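-- pv_equiv track=rewrite | github.com/tts-tcq-2024/tdd-practice-in-py-roma05c | StringCalculator.py | number_check
-- ===== SOURCE A (Python) =====
-- def number_check(a):
--     l = []
--     s = 0
--     sum = 0
--     for i in range(0,len(a)):
--         if(a[i] < 0):
--             l.append(a[i])
--             s = 1
--             continue
--         sum = sum + a[i]
--     return (num_neg(sum,s,l))
--
-- def num_neg(sum,s,l):
--     if (s == 0):
--         return sum
--     else:
--         raise Exception ("Negative No not allowed " + str(l))
-- ===== SOURCE B (Python) =====
-- def number_check(a):
--     # Divide and conquer: recursively split [lo, hi) in half, combining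
--     # (sum of nonnegatives, negatives in order) pairs from the two halves.
--     def solve(lo, hi):
--         if hi - lo == 0:
--             return (0, [])
--         if hi - lo == 1:
--             x = a[lo]
--             return (0, [x]) if x < 0 else (x, [])
--         mid = (lo + hi) // 2
--         s1, n1 = solve(lo, mid)
--         s2, n2 = solve(mid, hi)
--         return (s1 + s2, n1 + n2)
--     total, negs = solve(0, len(a))
--     if negs:
--         raise Exception("Negative No not allowed " + str(negs))
--     return total
-- ===== Notes on version B (the rewrite author's own statement) =====
-- stated objective: alternative
-- what changed: Replaces A's indexed single-pass loop threading a negatives list, a flag and a running total with a divide-and-conquer recursion that splits the index range in half and combines (sum-of-nonnegatives, negatives-in-order) pairs, raising only after the recursion finishes.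
import Mathlib
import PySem

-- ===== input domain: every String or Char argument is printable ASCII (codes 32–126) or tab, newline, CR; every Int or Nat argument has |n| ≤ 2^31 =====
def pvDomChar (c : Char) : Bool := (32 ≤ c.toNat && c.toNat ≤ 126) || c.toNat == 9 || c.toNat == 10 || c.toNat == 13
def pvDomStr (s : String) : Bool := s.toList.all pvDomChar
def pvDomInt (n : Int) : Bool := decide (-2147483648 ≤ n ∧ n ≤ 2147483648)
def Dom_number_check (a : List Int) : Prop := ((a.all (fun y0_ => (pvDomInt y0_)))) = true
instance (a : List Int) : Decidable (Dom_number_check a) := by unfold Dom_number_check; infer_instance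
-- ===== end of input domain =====

-- B replaces A's fused single-pass loop by a divide-and-conquer recursion over index halves
-- (alternative algorithm, same O(n) cost). Both programs raise on any input containing a
-- negative number; Pre_ excludes exactly those inputs.


-- ===== PORT A =====
-- num_neg(sum, s, l): the raising branch (s ≠ 0) lies outside Pre_; 0 stands for the Exception.
def num_neg (sum : Int) (s : Int) (_l : List Int) : Int :=
  if s = 0 then sum else 0

-- one iteration of A's for-loop body on the state (l, s, sum), fed a[i]
def nc_step (st : List Int × Int × Int) (x : Int) : List Int × Int × Int :=
  if x < 0 then (st.1 ++ [x], 1, st.2.2) else (st.1, st.2.1, st.2.2 + x)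

def number_check (a : List Int) : Int :=
  let st := (PySem.List.pyRange 0 (PySem.List.len a) 1).foldl
    (fun st i => nc_step st (PySem.List.pyGetD a i 0))
    ([], 0, 0)
  num_neg st.2.2 st.2.1 st.1

-- ===== PORT B =====
-- solve(lo, hi) of Source B; lo, hi are the always-nonnegative index bounds (Nat).
-- a[lo] is in range whenever lo < a.length (guaranteed at every call), ported as getD.
def nc_solve (a : List Int) (lo hi : Nat) : Int × List Int :=
  if hi - lo = 0 then (0, [])
  else if hi - lo = 1 then
    let x := a.getD lo 0
    if x < 0 then (0, [x]) else (x, [])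
  else
    let mid := (lo + hi) / 2
    let r1 := nc_solve a lo mid
    let r2 := nc_solve a mid hi
    (r1.1 + r2.1, r1.2 ++ r2.2)
termination_by hi - lo
decreasing_by all_goals omega

-- negs nonempty means Python raises; that case lies outside Pre_ (0 stands for the Exception).
def number_check_alt (a : List Int) : Int :=
  let r := nc_solve a 0 a.length
  if r.2.isEmpty then r.1 else 0

-- ===== PRECONDITION & SPEC =====
-- Pre_ : no negative element (on any input with a negative, BOTH Pythons raise an Exception).
def Pre_number_check (a : List Int) : Prop := (a.all (fun x => 0 ≤ x)) = true
instance (a : List Int) : Decidable (Pre_number_check a) := by unfold Pre_number_check; infer_instance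
def pvWitness_number_check : List Int := [1, 2, 3]

def Spec_number_check (a : List Int) (out : Int) : Prop := out = number_check_alt a
instance (a : List Int) (out : Int) : Decidable (Spec_number_check a out) := by unfold Spec_number_check; infer_instance

-- ===== CLAIM =====
def Claim_equal_number_check : Prop := ∀ (a : List Int), Dom_number_check a → Pre_number_check a → Spec_number_check a (number_check a)

-- ===== LEMMAS AND PROOFS =====
-- A's loop, with every element nonnegative, keeps l = [] and s = 0 and accumulates the plain sum.
theorem numcheck_loop_sum (a : List Int) (h : ∀ x ∈ a, 0 ≤ x) (acc : Int) :
    a.foldl nc_step (([] : List Int), (0 : Int), acc)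
    = ([], 0, acc + a.sum) := by
  induction a generalizing acc with
  | nil => simp
  | cons y ys ih =>
    have hy : ¬ y < 0 := not_lt.mpr (h y (by simp))
    simp only [List.foldl_cons, nc_step, if_neg hy]
    rw [ih (fun x hx => h x (by simp [hx]))]
    simp [List.sum_cons]; ring

-- B's recursion, with every element nonnegative, returns the segment sum and no negatives.
theorem nc_solve_sum (a : List Int) (h : ∀ x ∈ a, 0 ≤ x) :
    ∀ (n lo hi : Nat), hi - lo = n → hi ≤ a.length →
    nc_solve a lo hi = (((a.drop lo).take (hi - lo)).sum, []) := by
  intro n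
  induction n using Nat.strong_induction_on with
  | _ n ih =>
    intro lo hi hn hhi
    rw [nc_solve]
    by_cases h0 : hi - lo = 0
    · simp [h0]
    · by_cases h1 : hi - lo = 1
      · have hlo : lo < a.length := by omega
        have hx : a[lo]?.getD 0 = a[lo] := by
          simp [List.getElem?_eq_getElem hlo]
        have hge : ¬ a[lo] < 0 := not_lt.mpr (h _ (a.getElem_mem hlo))
        have hseg : List.take 1 (List.drop lo a) = [a[lo]] := by
          rw [List.drop_eq_getElem_cons hlo, List.take_succ_cons, List.take_zero]
        simp [h0, h1, List.getD, hx, hge, hseg]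
      · simp only [h0, h1, if_false]
        have hmlt : (lo + hi) / 2 - lo < n := by omega
        have hmlt2 : hi - (lo + hi) / 2 < n := by omega
        rw [ih _ hmlt _ _ rfl (by omega), ih _ hmlt2 _ _ rfl hhi]
        have hsplit : ((a.drop lo).take (hi - lo)).sum
            = ((a.drop lo).take ((lo + hi) / 2 - lo)).sum
              + ((a.drop ((lo + hi) / 2)).take (hi - (lo + hi) / 2)).sum := by
          have hd : a.drop ((lo + hi) / 2)
              = (a.drop lo).drop ((lo + hi) / 2 - lo) := by
            rw [List.drop_drop]
            congr 1
            omega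
          rw [hd, ← List.sum_append, ← List.take_add]
          congr 2
          omega
        simp [hsplit]

-- ===== VERDICT =====
theorem number_check_spec : Claim_equal_number_check := by
  intro a _ hpre
  have h : ∀ x ∈ a, 0 ≤ x := by
    intro x hx
    exact of_decide_eq_true (List.all_eq_true.mp hpre x hx)
  unfold Spec_number_check number_check number_check_alt num_neg
  have hb : List.foldl (fun st i => nc_step st (PySem.List.pyGetD a i 0)) ([], 0, 0)
      (PySem.List.pyRange 0 (PySem.List.len a) 1) = a.foldl nc_step ([], 0, 0) := by
    exact PySem.List.foldl_pyRange_zero_pyGetD a 0 nc_step ([], 0, 0)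
  rw [hb, numcheck_loop_sum a h 0, nc_solve_sum a h (a.length - 0) 0 a.length rfl le_rfl]
  simp
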